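-- pv_equiv track=rewrite | github.com/poorthins/carbonfootprint_indexs | civil_correct.py | max_consecutive_appendix
-- ===== SOURCE A (Python) =====
-- def max_consecutive_appendix(names):
--     max_count = 0
--     current_count = 0
--
--     for name in names:
--         if name=='appendix':
--             current_count += 1
--             max_count = max(max_count, current_count)
--         else:
--             current_count = 0
--
--     return max_count
-- ===== SOURCE B (Python) =====
-- def max_consecutive_appendix(names):
--     # group-then-reduce: scan each maximal run of equal values with two pointers
--     best = 0
--     i = 0
--     n = len(names)
--     while i < n:
--         j = i + 1
--         while j < n and names[j] == names[i]:
--             j += 1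
--         if names[i] == 'appendix':
--             best = max(best, j - i)
--         i = j
--     return best
-- ===== Notes on version B (the rewrite author's own statement) =====
-- stated objective: alternative
-- what changed: Replaces the running-counter-with-reset loop by a two-pointer group-then-reduce pass: each maximal run of equal consecutive values is measured at once and only 'appendix' runs feed the maximum.
import Mathlib
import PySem

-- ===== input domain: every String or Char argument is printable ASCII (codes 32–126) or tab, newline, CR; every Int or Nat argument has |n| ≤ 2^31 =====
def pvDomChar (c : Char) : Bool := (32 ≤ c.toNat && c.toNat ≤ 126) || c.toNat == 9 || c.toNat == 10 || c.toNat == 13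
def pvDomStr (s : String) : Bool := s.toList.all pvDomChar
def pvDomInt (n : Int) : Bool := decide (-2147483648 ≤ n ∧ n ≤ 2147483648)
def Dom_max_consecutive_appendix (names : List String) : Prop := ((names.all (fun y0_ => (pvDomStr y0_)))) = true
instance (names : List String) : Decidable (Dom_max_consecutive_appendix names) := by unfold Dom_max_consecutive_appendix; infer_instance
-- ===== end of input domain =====

-- B replaces A's running-counter-with-reset loop by a two-pointer group-then-reduce scan
-- (measure each maximal run of equal values at once); alternative decomposition, same cost.

-- ===== PORT A =====
-- literal port of A's loop: (current_count, max_count) threaded through the list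
def aLoop_mca : List String → Int → Int → Int
  | [], _, mx => mx
  | n :: t, cur, mx =>
      if n == "appendix" then aLoop_mca t (cur + 1) (max mx (cur + 1))
      else aLoop_mca t 0 mx

def max_consecutive_appendix (names : List String) : Int := aLoop_mca names 0 0

-- ===== PORT B =====
-- outer while loop of Source B: the inner while (scan the run of names[i]) is takeWhile/dropWhile
def altLoop_mca (best : Int) (l : List String) : Int :=
  match l with
  | [] => best
  | x :: t =>
      altLoop_mca
        (if x == "appendix" then max best ((t.takeWhile (fun y => y == x)).length + 1) else best)
        (t.dropWhile (fun y => y == x))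
  termination_by l.length
  decreasing_by
    simpa using Nat.lt_succ_of_le (List.length_dropWhile_le (fun y => y == x) t)

def max_consecutive_appendix_alt (names : List String) : Int := altLoop_mca 0 names

-- ===== PRECONDITION & SPEC =====
def Spec_max_consecutive_appendix (names : List String) (out : Int) : Prop := out = max_consecutive_appendix_alt names
instance (names : List String) (out : Int) : Decidable (Spec_max_consecutive_appendix names out) := by unfold Spec_max_consecutive_appendix; infer_instance

-- ===== CLAIM (what is proved, stated in full; the proofs are below) =====
def Claim_equal_max_consecutive_appendix : Prop := ∀ (names : List String), Dom_max_consecutive_appendix names → Spec_max_consecutive_appendix names (max_consecutive_appendix names)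

-- ===== LEMMAS AND PROOFS =====

-- common characterisation: ext c l = best run length, with c appendixes already pending
def ext_mca (c : Int) : List String → Int
  | [] => c
  | x :: t => if x == "appendix" then ext_mca (c + 1) t else max c (ext_mca 0 t)

theorem ext_mca_ge (c : Int) (l : List String) : c ≤ ext_mca c l := by
  induction l generalizing c with
  | nil => simp [ext_mca]
  | cons x t ih =>
      simp only [ext_mca]
      split
      · exact le_trans (by omega) (ih (c + 1))
      · exact le_max_left _ _

theorem aLoop_mca_ext (l : List String) : ∀ cur mx : Int, 0 ≤ cur → cur ≤ mx →
    aLoop_mca l cur mx = max mx (ext_mca cur l) := by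
  induction l with
  | nil => intro cur mx h0 h1; simp [aLoop_mca, ext_mca]; omega
  | cons x t ih =>
      intro cur mx h0 h1
      simp only [aLoop_mca, ext_mca]
      split
      · rw [ih (cur + 1) (max mx (cur + 1)) (by omega) (by omega)]
        have := ext_mca_ge (cur + 1) t
        omega
      · rw [ih 0 mx (by omega) (by omega)]
        omega

-- skipping a run of non-"appendix" copies of x does not change the best run
theorem ext_mca_dropWhile (x : String) (t : List String) (hx : (x == "appendix") = false) :
    ext_mca 0 (t.dropWhile (fun y => y == x)) = ext_mca 0 t := by
  induction t with
  | nil => rfl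
  | cons y u ih =>
      by_cases hyx : (y == x) = true
      · have hy : (y == "appendix") = false := by
          have : y = x := by simpa using hyx
          simpa [this] using hx
        have hge := ext_mca_ge 0 u
        simp [List.dropWhile, hyx, ih, ext_mca, hy]
        omega
      · simp [List.dropWhile, hyx]

-- consuming a whole run of appendixes at once
theorem ext_mca_run (t : List String) : ∀ c : Int, 0 ≤ c →
    ext_mca (c + 1) t =
      max (c + 1 + (t.takeWhile (fun y => y == "appendix")).length)
        (ext_mca 0 (t.dropWhile (fun y => y == "appendix"))) := by
  induction t with
  | nil => intro c hc; simp [ext_mca]; omega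
  | cons y u ih =>
      intro c hc
      by_cases hy : (y == "appendix") = true
      · have := ih (c + 1) (by omega)
        simp only [ext_mca, List.takeWhile, List.dropWhile, hy, if_pos, List.length_cons] at *
        rw [this]
        push_cast
        omega
      · have hge := ext_mca_ge 0 u
        simp [ext_mca, List.takeWhile, List.dropWhile, hy]
        omega

theorem altLoop_mca_ext (best : Int) (l : List String) : 0 ≤ best →
    altLoop_mca best l = max best (ext_mca 0 l) := by
  induction best, l using altLoop_mca.induct with
  | case1 best => intro h; simp [altLoop_mca, ext_mca]; omega
  | case2 best x t ih =>
      intro h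
      rw [altLoop_mca]
      by_cases hx : (x == "appendix") = true
      · have hx' : x = "appendix" := by simpa using hx
        subst hx'
        have ih' := ih (by simp; omega)
        simp only [beq_self_eq_true, if_true, dite_true] at ih' ⊢
        rw [ih']
        have hrun := ext_mca_run t 0 (le_refl 0)
        simp only [ext_mca, beq_self_eq_true, if_true]
        omega
      · have hxf : (x == "appendix") = false := by simp_all
        have ih' := ih (by simp [hxf]; omega)
        simp only [hxf, Bool.false_eq_true, if_false, dite_false] at ih' ⊢
        rw [ih']
        have hdw := ext_mca_dropWhile x t hxf
        have hge := ext_mca_ge 0 t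
        simp only [ext_mca, hxf, Bool.false_eq_true, if_false]
        rw [hdw]
        omega

-- ===== VERDICT (by name: the statement is the Claim_ definition above) =====
theorem max_consecutive_appendix_spec : Claim_equal_max_consecutive_appendix := by
  intro names _
  show max_consecutive_appendix names = max_consecutive_appendix_alt names
  unfold max_consecutive_appendix max_consecutive_appendix_alt
  rw [aLoop_mca_ext names 0 0 le_rfl le_rfl, altLoop_mca_ext 0 names le_rfl]
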